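-- pv_equiv track=rewrite | github.com/viniciusao/awscdk-demo | api/runtime_chalice/app.py | separate_key_values
-- ===== SOURCE A (Python) =====
-- from typing import List, Optional, Tuple
-- from unicodedata import normalize
--
-- def separate_key_values(texts: List[str]) -> Tuple[List, List]:
--     keys, values = [], []
--     flag = False
--     for t in texts:
--         if t.endswith(':') and '\n' not in t:
--             keys.append(
--                 normalize('NFKD', t.strip(':')))
--             flag = True
--             continue
--         if flag:
--             values.append(normalize('NFKD', t))
--             flag = False
--         else:
--             values.append(
--                 normalize('NFKD', '@!' + t))
--
--     return keys, values
-- ===== SOURCE B (Python) =====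
-- from typing import List, Tuple
-- from unicodedata import normalize
--
-- def separate_key_values(texts: List[str]) -> Tuple[List, List]:
--     is_key = [t.endswith(':') and '\n' not in t for t in texts]
--     prev = [False] + is_key  # zip truncates: element i sees whether element i-1 was a key
--     keys = [normalize('NFKD', t.strip(':')) for t, k in zip(texts, is_key) if k]
--     values = [normalize('NFKD', t if p else '@!' + t)
--               for t, k, p in zip(texts, is_key, prev) if not k]
--     return keys, values
-- ===== Notes on version B (the rewrite author's own statement) =====
-- stated objective: idiomatic
-- what changed: Replaces A's single stateful loop (flag carried across iterations) by a precomputed is_key mask, a shifted prev mask, and two independent filtering comprehensions for keys and values.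
import Mathlib
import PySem

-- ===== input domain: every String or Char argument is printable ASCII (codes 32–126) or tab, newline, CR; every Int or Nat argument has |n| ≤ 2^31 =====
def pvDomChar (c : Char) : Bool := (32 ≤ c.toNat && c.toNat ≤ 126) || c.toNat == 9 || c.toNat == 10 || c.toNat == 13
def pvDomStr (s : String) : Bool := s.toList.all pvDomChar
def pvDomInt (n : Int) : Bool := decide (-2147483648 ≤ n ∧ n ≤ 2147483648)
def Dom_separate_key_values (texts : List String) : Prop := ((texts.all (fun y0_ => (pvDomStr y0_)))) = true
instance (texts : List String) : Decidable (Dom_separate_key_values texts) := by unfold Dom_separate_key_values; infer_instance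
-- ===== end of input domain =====

-- B replaces A's stateful flag loop by a precomputed is_key mask, a shifted prev mask and two filtering passes (objective: idiomatic).
-- normalize('NFKD', s) is the identity on the ASCII domain (Dom_), so both ports omit it; exact on Dom_.

-- shared key test: t.endswith(':') and '\n' not in t  (literal in both Pythons)
def pvIsKey (t : String) : Bool := PySem.Str.endswith t ":" && !(PySem.Str.isIn "\n" t)

-- ===== PORT A =====
-- one loop step of A: state = (keys, values, flag)
def sepStepA (st : List String × List String × Bool) (t : String) : List String × List String × Bool :=
  if pvIsKey t then
    (st.1 ++ [PySem.Str.stripChars t ":"], st.2.1, true)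
  else if st.2.2 then
    (st.1, st.2.1 ++ [t], false)
  else
    (st.1, st.2.1 ++ ["@!" ++ t], false)

def separate_key_values (texts : List String) : List String × List String :=
  let r := texts.foldl sepStepA ([], [], false)
  (r.1, r.2.1)

-- ===== PORT B =====
def separate_key_values_alt (texts : List String) : List String × List String :=
  let is_key := texts.map pvIsKey
  let prev := false :: is_key            -- zip truncates, as Python's zip does
  let keys := ((texts.zip is_key).filter (fun p => p.2)).map
      (fun p => PySem.Str.stripChars p.1 ":")
  let values := ((texts.zip (is_key.zip prev)).filter (fun p => !p.2.1)).map
      (fun p => if p.2.2 then p.1 else "@!" ++ p.1)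
  (keys, values)

-- ===== PRECONDITION & SPEC =====
def Spec_separate_key_values (texts : List String) (out : List String × List String) : Prop := out = separate_key_values_alt texts
instance (texts : List String) (out : List String × List String) : Decidable (Spec_separate_key_values texts out) := by unfold Spec_separate_key_values; infer_instance

-- ===== CLAIM (what is proved, stated in full; the proofs are below) =====
def Claim_equal_separate_key_values : Prop := ∀ (texts : List String), Dom_separate_key_values texts → Spec_separate_key_values texts (separate_key_values texts)

-- ===== LEMMAS AND PROOFS =====

-- reference recursive descriptions of the two result components
def pvKeysOf : List String → List String
  | [] => []
  | t :: ts => if pvIsKey t then PySem.Str.stripChars t ":" :: pvKeysOf ts else pvKeysOf ts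

def pvValsOf : Bool → List String → List String
  | _, [] => []
  | b, t :: ts =>
    if pvIsKey t then pvValsOf true ts
    else (if b then t else "@!" ++ t) :: pvValsOf false ts

def pvEndFlag : Bool → List String → Bool
  | b, [] => b
  | _, t :: ts => pvEndFlag (pvIsKey t) ts

-- A's loop computes exactly (keys so far ++ pvKeysOf, values so far ++ pvValsOf flag, final flag)
theorem pvA_loop (ts : List String) : ∀ (ks vs : List String) (b : Bool),
    List.foldl sepStepA (ks, vs, b) ts = (ks ++ pvKeysOf ts, vs ++ pvValsOf b ts, pvEndFlag b ts) := by
  induction ts with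
  | nil => intro ks vs b; simp [pvKeysOf, pvValsOf, pvEndFlag]
  | cons t ts ih =>
    intro ks vs b
    cases hk : pvIsKey t <;> cases b <;>
      simp [List.foldl, sepStepA, hk, ih, pvKeysOf, pvValsOf, pvEndFlag]

-- B's keys pass equals pvKeysOf
theorem pvB_keys (ts : List String) :
    ((ts.zip (ts.map pvIsKey)).filter (fun p => p.2)).map
        (fun p => PySem.Str.stripChars p.1 ":") = pvKeysOf ts := by
  induction ts with
  | nil => simp [pvKeysOf]
  | cons t ts ih =>
    cases hk : pvIsKey t <;>
      simp [List.zip_cons_cons, List.filter_cons, pvKeysOf, hk, ih]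

-- B's values pass, with an arbitrary head of the shifted mask, equals pvValsOf
theorem pvB_vals (ts : List String) : ∀ (b : Bool),
    ((ts.zip ((ts.map pvIsKey).zip (b :: ts.map pvIsKey))).filter (fun p => !p.2.1)).map
        (fun p => if p.2.2 then p.1 else "@!" ++ p.1) = pvValsOf b ts := by
  induction ts with
  | nil => intro b; simp [pvValsOf]
  | cons t ts ih =>
    intro b
    cases hk : pvIsKey t <;> cases b <;>
      simp [List.zip_cons_cons, pvValsOf, hk, ih]

-- ===== VERDICT (by name: the statement is the Claim_ definition above) =====
theorem separate_key_values_spec : Claim_equal_separate_key_values := by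
  intro texts _
  unfold Spec_separate_key_values separate_key_values separate_key_values_alt
  show _ = (((texts.zip (texts.map pvIsKey)).filter (fun p => p.2)).map
      (fun p => PySem.Str.stripChars p.1 ":"),
    ((texts.zip ((texts.map pvIsKey).zip (false :: texts.map pvIsKey))).filter (fun p => !p.2.1)).map
      (fun p => if p.2.2 then p.1 else "@!" ++ p.1))
  rw [pvB_keys, pvB_vals, pvA_loop]
  simp
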